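-- pv_equiv track=rewrite | github.com/PrabhatKushwaha5/DSA_Using-_Python | 1Companies/TCS/TCSSeason13P1.py | min_cut_insert
-- ===== SOURCE A (Python) =====
-- def can_form_by_one_cut_insert(shuffled, original):
--     N = len(shuffled)
--     if shuffled == original:
--         return True
--     for l in range(N):
--         for r in range(l, N):
--             segment = shuffled[l:r+1]
--             remaining = shuffled[:l] + shuffled[r+1:]
--             for i in range(len(remaining)+1):
--                 candidate = remaining[:i] + segment + remaining[i:]
--                 if candidate == original:
--                     return True
--     return False
--
-- def min_cut_insert(shuffled, original):
--     if shuffled == original: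
--         return 0
--     if can_form_by_one_cut_insert(shuffled, original):
--         return 1
--
--     N = len(shuffled)
--     # Try all one cut-insert operations and check if from the resulting list,
--     # original can be formed by one more cut-insert.
--     for l1 in range(N):
--         for r1 in range(l1, N):
--             segment1 = shuffled[l1:r1+1]
--             remaining1 = shuffled[:l1] + shuffled[r1+1:]
--             for i1 in range(len(remaining1)+1):
--                 after_one = remaining1[:i1] + segment1 + remaining1[i1:]
--                 # Now check if from after_one we can get original by one cut-insert
--                 if can_form_by_one_cut_insert(after_one, original):
--                     return 2
--     return 2  # If not possible with 0 or 1, then must be 2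
-- ===== SOURCE B (Python) =====
-- def min_cut_insert(shuffled, original):
--     if shuffled == original:
--         return 0
--     n = len(shuffled)
--     # One cut+insert == swapping two adjacent blocks: pick cut points i <= j <= k
--     # and move the block shuffled[j:k] in front of shuffled[i:j].
--     for i in range(n + 1):
--         for j in range(i, n + 1):
--             for k in range(j, n + 1):
--                 if shuffled[:i] + shuffled[j:k] + shuffled[i:j] + shuffled[k:] == original:
--                     return 1
--     return 2
-- ===== Notes on version B (the rewrite author's own statement) =====
-- stated objective: faster
-- what changed: B drops A's entire second-level search over all first moves (A returns 2 unconditionally after it) and tests a single block move by directly comparing the adjacent-block swap shuffled[:i]+shuffled[j:k]+shuffled[i:j]+shuffled[k:] with original over three cut points, instead of rebuilding segment/remaining/candidate lists for every (cut, insertion-position) pair.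
import Mathlib
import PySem

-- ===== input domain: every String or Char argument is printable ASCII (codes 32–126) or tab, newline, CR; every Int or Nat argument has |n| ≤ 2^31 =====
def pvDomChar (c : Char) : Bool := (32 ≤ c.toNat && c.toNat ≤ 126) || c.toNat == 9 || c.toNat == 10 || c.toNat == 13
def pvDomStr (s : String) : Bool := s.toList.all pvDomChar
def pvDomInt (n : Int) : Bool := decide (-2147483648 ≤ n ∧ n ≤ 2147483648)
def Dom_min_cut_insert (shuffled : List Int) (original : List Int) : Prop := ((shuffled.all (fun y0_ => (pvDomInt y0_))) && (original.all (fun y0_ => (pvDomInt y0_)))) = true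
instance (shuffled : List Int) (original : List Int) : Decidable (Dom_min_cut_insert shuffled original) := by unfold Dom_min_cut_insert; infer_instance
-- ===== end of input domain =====

-- B removes A's redundant second-level two-move search (A returns 2 on both of that branch's
-- outcomes) and checks a single block move as an adjacent-block swap over three cut points.


-- ===== PORT A =====
def can_form_by_one_cut_insert (shuffled : List Int) (original : List Int) : Bool :=
  let N : Int := shuffled.length
  if shuffled == original then true
  else
    (PySem.List.pyRange 0 N 1).any fun l =>
      (PySem.List.pyRange l N 1).any fun r =>
        let segment := PySem.List.slice shuffled (some l) (some (r + 1))
        let remaining := PySem.List.slice shuffled none (some l) ++ PySem.List.slice shuffled (some (r + 1)) none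
        (PySem.List.pyRange 0 ((remaining.length : Int) + 1) 1).any fun i =>
          (PySem.List.slice remaining none (some i) ++ segment ++ PySem.List.slice remaining (some i) none) == original

def min_cut_insert (shuffled : List Int) (original : List Int) : Int :=
  if shuffled == original then 0
  else if can_form_by_one_cut_insert shuffled original then 1
  else
    let N : Int := shuffled.length
    if (PySem.List.pyRange 0 N 1).any (fun l1 =>
        (PySem.List.pyRange l1 N 1).any fun r1 =>
          let segment1 := PySem.List.slice shuffled (some l1) (some (r1 + 1))
          let remaining1 := PySem.List.slice shuffled none (some l1) ++ PySem.List.slice shuffled (some (r1 + 1)) none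
          (PySem.List.pyRange 0 ((remaining1.length : Int) + 1) 1).any fun i1 =>
            can_form_by_one_cut_insert
              (PySem.List.slice remaining1 none (some i1) ++ segment1 ++ PySem.List.slice remaining1 (some i1) none)
              original)
    then 2 else 2

-- ===== PORT B =====
def min_cut_insert_alt (shuffled : List Int) (original : List Int) : Int :=
  if shuffled == original then 0
  else
    let n : Int := shuffled.length
    if (PySem.List.pyRange 0 (n + 1) 1).any (fun i =>
        (PySem.List.pyRange i (n + 1) 1).any fun j =>
          (PySem.List.pyRange j (n + 1) 1).any fun k =>
            (PySem.List.slice shuffled none (some i) ++ PySem.List.slice shuffled (some j) (some k) ++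
              PySem.List.slice shuffled (some i) (some j) ++ PySem.List.slice shuffled (some k) none) == original)
    then 1 else 2

-- ===== PRECONDITION & SPEC =====
def Spec_min_cut_insert (shuffled : List Int) (original : List Int) (out : Int) : Prop := out = min_cut_insert_alt shuffled original
instance (shuffled : List Int) (original : List Int) (out : Int) : Decidable (Spec_min_cut_insert shuffled original out) := by unfold Spec_min_cut_insert; infer_instance

-- ===== CLAIM (what is proved, stated in full; the proofs are below) =====
def Claim_equal_min_cut_insert : Prop := ∀ (shuffled : List Int) (original : List Int), Dom_min_cut_insert shuffled original → Spec_min_cut_insert shuffled original (min_cut_insert shuffled original)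

-- ===== LEMMAS AND PROOFS =====

-- Abstract characterisation shared by both one-move tests: original is obtained from
-- shuffled by swapping two adjacent blocks (possibly empty).
def SwapAdj (sh org : List Int) : Prop :=
  ∃ p x y s : List Int, sh = p ++ x ++ y ++ s ∧ org = p ++ y ++ x ++ s

theorem swapAdj_refl (sh : List Int) : SwapAdj sh sh :=
  ⟨sh, [], [], [], by simp, by simp⟩

theorem decomp (sh : List Int) (a b c : Nat) (hab : a ≤ b) (hbc : b ≤ c) :
    sh = sh.take a ++ ((sh.drop a).take (b-a) ++ ((sh.drop b).take (c-b) ++ sh.drop c)) := by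
  conv_lhs => rw [← List.take_append_drop a sh]
  congr 1
  conv_lhs => rw [← List.take_append_drop (b-a) (sh.drop a)]
  rw [List.drop_drop, Nat.add_sub_cancel' hab]
  congr 1
  conv_lhs => rw [← List.take_append_drop (c-b) (sh.drop b)]
  rw [List.drop_drop, Nat.add_sub_cancel' hbc]

theorem canA_iff (sh org : List Int) :
    can_form_by_one_cut_insert sh org = true ↔ SwapAdj sh org := by
  unfold can_form_by_one_cut_insert
  by_cases heq : sh = org
  · subst heq
    simp only [beq_self_eq_true, if_true, true_iff]
    exact swapAdj_refl sh
  · simp only [beq_iff_eq, heq, if_false]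
    constructor
    · intro h
      obtain ⟨l, hl, h⟩ := List.any_eq_true.mp h
      obtain ⟨r, hr, h⟩ := List.any_eq_true.mp h
      obtain ⟨i, hi, h⟩ := List.any_eq_true.mp h
      rw [PySem.List.mem_pyRange_one] at hl hr hi
      obtain ⟨a, rfl⟩ : ∃ a : Nat, l = (a:Int) := ⟨l.toNat, (Int.toNat_of_nonneg hl.1).symm⟩
      obtain ⟨b, rfl⟩ : ∃ b : Nat, r = (b:Int) := ⟨r.toNat, (Int.toNat_of_nonneg (le_trans hl.1 hr.1)).symm⟩
      obtain ⟨e, rfl⟩ : ∃ e : Nat, i = (e:Int) := ⟨i.toNat, (Int.toNat_of_nonneg hi.1).symm⟩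
      rw [show ((b:Int)+1) = ((b+1 : Nat):Int) by push_cast; ring] at h
      rw [PySem.List.slice_natCast, PySem.List.slice_to_natCast, PySem.List.slice_from_natCast,
        PySem.List.slice_to_natCast, PySem.List.slice_from_natCast, beq_iff_eq] at h
      have hab : a ≤ b := by exact_mod_cast hr.1
      have han : a < sh.length := by exact_mod_cast hl.2
      by_cases hea : e ≤ a
      · refine ⟨sh.take e, (sh.drop e).take (a - e), (sh.drop a).take (b+1-a), sh.drop (b+1),
          by simpa using decomp sh e a (b+1) hea (by omega), ?_⟩
        rw [← h]
        simp [List.take_append, List.drop_append, List.take_take, List.drop_take,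
          min_eq_left hea, Nat.sub_eq_zero_of_le hea, min_eq_left han.le]
      · have hae : a ≤ e := by omega
        refine ⟨sh.take a, (sh.drop a).take (b+1-a), (sh.drop (b+1)).take (e-a), sh.drop (b+1+(e-a)),
          by simpa [Nat.add_sub_cancel_left] using decomp sh a (b+1) (b+1+(e-a)) (by omega) (by omega), ?_⟩
        rw [← h]
        simp [List.take_append, List.drop_append, List.take_take, List.drop_take, List.drop_drop,
          min_eq_right hae, Nat.sub_eq_zero_of_le hae, min_eq_left han.le]
    · rintro ⟨p, x, y, s, rfl, rfl⟩
      have hx : 1 ≤ x.length := by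
        rcases x with _ | _ <;> simp_all
      have hy : 1 ≤ y.length := by
        rcases y with _ | _ <;> simp_all
      apply List.any_eq_true.mpr
      refine ⟨(p.length : Int), ?_, ?_⟩
      · rw [PySem.List.mem_pyRange_one]
        constructor
        · positivity
        · push_cast [List.length_append]; omega
      apply List.any_eq_true.mpr
      refine ⟨(p.length : Int) + (x.length : Int) - 1, ?_, ?_⟩
      · rw [PySem.List.mem_pyRange_one]
        constructor
        · omega
        · push_cast [List.length_append]; omega
      rw [show ((p.length:Int) + (x.length:Int) - 1 + 1) = ((p.length + x.length : Nat):Int) by push_cast; ring]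
      rw [PySem.List.slice_natCast, PySem.List.slice_to_natCast, PySem.List.slice_from_natCast]
      apply List.any_eq_true.mpr
      refine ⟨((p.length + y.length : Nat) : Int), ?_, ?_⟩
      · rw [PySem.List.mem_pyRange_one]
        constructor
        · positivity
        · push_cast [List.length_append, List.length_take, List.length_drop]; omega
      rw [PySem.List.slice_to_natCast, PySem.List.slice_from_natCast, beq_iff_eq]
      have e1 : p.length + x.length - p.length = x.length := by omega
      simp [List.take_append, List.drop_append, e1,
        List.take_of_length_le (Nat.le_add_right p.length y.length),
        List.drop_of_length_le (Nat.le_add_right p.length x.length),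
        List.drop_of_length_le (Nat.le_add_right p.length y.length)]

theorem oneB_iff (sh org : List Int) :
    ((PySem.List.pyRange 0 ((sh.length : Int) + 1) 1).any (fun i =>
        (PySem.List.pyRange i ((sh.length : Int) + 1) 1).any fun j =>
          (PySem.List.pyRange j ((sh.length : Int) + 1) 1).any fun k =>
            (PySem.List.slice sh none (some i) ++ PySem.List.slice sh (some j) (some k) ++
              PySem.List.slice sh (some i) (some j) ++ PySem.List.slice sh (some k) none) == org)) = true
      ↔ SwapAdj sh org := by
  constructor
  · intro h
    obtain ⟨i, hi, h⟩ := List.any_eq_true.mp h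
    obtain ⟨j, hj, h⟩ := List.any_eq_true.mp h
    obtain ⟨k, hk, h⟩ := List.any_eq_true.mp h
    rw [PySem.List.mem_pyRange_one] at hi hj hk
    obtain ⟨a, rfl⟩ : ∃ a : Nat, i = (a : Int) := ⟨i.toNat, (Int.toNat_of_nonneg hi.1).symm⟩
    obtain ⟨b, rfl⟩ : ∃ b : Nat, j = (b : Int) := ⟨j.toNat, (Int.toNat_of_nonneg (le_trans hi.1 hj.1)).symm⟩
    obtain ⟨c, rfl⟩ : ∃ c : Nat, k = (c : Int) := ⟨k.toNat, (Int.toNat_of_nonneg (le_trans (le_trans hi.1 hj.1) hk.1)).symm⟩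
    have hab : a ≤ b := by exact_mod_cast hj.1
    have hbc : b ≤ c := by exact_mod_cast hk.1
    rw [PySem.List.slice_to_natCast, PySem.List.slice_natCast, PySem.List.slice_natCast,
      PySem.List.slice_from_natCast, beq_iff_eq] at h
    exact ⟨sh.take a, (sh.drop a).take (b-a), (sh.drop b).take (c-b), sh.drop c,
      by simpa using decomp sh a b c hab hbc, by simpa using h.symm⟩
  · rintro ⟨p, x, y, s, rfl, rfl⟩
    apply List.any_eq_true.mpr
    refine ⟨(p.length : Int), ?_, ?_⟩
    · rw [PySem.List.mem_pyRange_one]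
      constructor
      · positivity
      · push_cast [List.length_append]; omega
    apply List.any_eq_true.mpr
    refine ⟨((p.length + x.length : Nat) : Int), ?_, ?_⟩
    · rw [PySem.List.mem_pyRange_one]
      constructor
      · exact_mod_cast Nat.le_add_right _ _
      · push_cast [List.length_append]; omega
    apply List.any_eq_true.mpr
    refine ⟨((p.length + x.length + y.length : Nat) : Int), ?_, ?_⟩
    · rw [PySem.List.mem_pyRange_one]
      constructor
      · exact_mod_cast Nat.le_add_right _ _
      · push_cast [List.length_append]; omega
    rw [PySem.List.slice_to_natCast, PySem.List.slice_natCast, PySem.List.slice_natCast,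
      PySem.List.slice_from_natCast, beq_iff_eq]
    have e2 : p.length + x.length + y.length - p.length - x.length = y.length := by omega
    simp [List.drop_append, e2,
      List.drop_of_length_le (Nat.le_add_right _ _)]
    rw [List.drop_of_length_le (by omega), List.drop_of_length_le (by omega)]
    simp

-- ===== VERDICT (by name: the statement is the Claim_ definition above) =====
theorem min_cut_insert_spec : Claim_equal_min_cut_insert := by
  intro sh org _
  unfold Spec_min_cut_insert min_cut_insert min_cut_insert_alt
  by_cases heq : sh = org
  · simp [heq]
  · simp only [beq_iff_eq, heq, if_false]
    by_cases h1 : SwapAdj sh org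
    · rw [if_pos ((canA_iff sh org).mpr h1), if_pos ((oneB_iff sh org).mpr h1)]
    · rw [if_neg (fun hc => h1 ((canA_iff sh org).mp hc)),
        if_neg (fun hc => h1 ((oneB_iff sh org).mp hc))]
      split <;> rfl
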